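-- pv_equiv track=rewrite | github.com/jnsia/Algorithm | 백준/Bronze/8958. OX퀴즈/OX퀴즈.py | ox
-- ===== SOURCE A (Python) =====
-- def ox(string):
--     result = 0
--     count = 1
--     prev = 'X'
--
--     for i in string:
--         if i == 'O':
--             if prev == i:
--                 count += 1
--
--             result += count
--             prev = 'O'
--         else:
--             prev = 'X'
--             count = 1
--
--     return result
-- ===== SOURCE B (Python) =====
-- def ox(string):
--     total = 0
--     run = 0
--     for ch in string:
--         if ch == 'O':
--             run += 1
--         else:
--             total += run * (run + 1) // 2
--             run = 0
--     return total + run * (run + 1) // 2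
-- ===== Notes on version B (the rewrite author's own statement) =====
-- stated objective: alternative
-- what changed: B tracks the length of the current run of correct answers and flushes the closed-form triangular number run*(run+1)//2 at each run break, instead of A's live streak counter added to the result at every step.
import Mathlib
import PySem

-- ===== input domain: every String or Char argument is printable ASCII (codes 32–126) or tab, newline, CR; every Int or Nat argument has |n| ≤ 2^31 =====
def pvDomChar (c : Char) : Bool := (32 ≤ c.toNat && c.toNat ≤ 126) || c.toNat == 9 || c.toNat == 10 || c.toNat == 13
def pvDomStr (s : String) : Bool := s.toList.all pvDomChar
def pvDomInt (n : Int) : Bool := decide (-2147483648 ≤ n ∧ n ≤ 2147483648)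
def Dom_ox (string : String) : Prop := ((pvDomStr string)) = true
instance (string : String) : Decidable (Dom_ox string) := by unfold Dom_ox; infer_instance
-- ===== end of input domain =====

-- B replaces A's live streak counter by run-length tracking with the closed-form
-- triangular number run*(run+1)//2 flushed at each run break (objective: alternative decomposition).

-- ===== PORT A =====
-- state = (result, count, prev), exactly A's loop
def oxStepA (st : Int × Int × Char) (i : Char) : Int × Int × Char :=
  let (result, count, prev) := st
  if i = 'O' then
    let count := if prev = i then count + 1 else count
    (result + count, count, 'O')
  else
    (result, 1, 'X')

def ox (string : String) : Int :=
  (string.toList.foldl oxStepA (0, 1, 'X')).1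

-- ===== PORT B =====
-- state = (total, run), exactly B's loop; flush uses Python // via PySem.Int.floordiv
def oxStepB (st : Int × Int) (ch : Char) : Int × Int :=
  let (total, run) := st
  if ch = 'O' then (total, run + 1)
  else (total + PySem.Int.floordiv (run * (run + 1)) 2, 0)

def ox_alt (string : String) : Int :=
  let st := string.toList.foldl oxStepB (0, 0)
  st.1 + PySem.Int.floordiv (st.2 * (st.2 + 1)) 2

-- ===== PRECONDITION & SPEC =====
def Spec_ox (string : String) (out : Int) : Prop := out = ox_alt string
instance (string : String) (out : Int) : Decidable (Spec_ox string out) := by unfold Spec_ox; infer_instance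

-- ===== CLAIM (what is proved, stated in full; the proofs are below) =====
def Claim_equal_ox : Prop := ∀ (string : String), Dom_ox string → Spec_ox string (ox string)

-- ===== LEMMAS AND PROOFS =====

theorem tri_flush (run : Int) (_h : 0 ≤ run) :
    PySem.Int.floordiv (run * (run + 1)) 2 = run * (run + 1) / 2 :=
  PySem.Int.floordiv_eq_ediv_of_pos (by omega)

-- invariant linking A's state to B's state
def StInv (a : Int × Int × Char) (b : Int × Int) : Prop :=
  a.1 = b.1 + b.2 * (b.2 + 1) / 2 ∧
  0 ≤ b.2 ∧
  ((a.2.2 = 'O' ∧ a.2.1 = b.2 ∧ 0 < b.2) ∨ (a.2.2 = 'X' ∧ a.2.1 = 1 ∧ b.2 = 0))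

theorem tri_succ (n : Int) (_h : 0 ≤ n) :
    (n + 1) * (n + 1 + 1) / 2 = n * (n + 1) / 2 + (n + 1) := by
  have h2 : (n + 1) * (n + 1 + 1) = n * (n + 1) + 2 * (n + 1) := by ring
  omega

theorem inv_step (a : Int × Int × Char) (b : Int × Int) (c : Char)
    (h : StInv a b) : StInv (oxStepA a c) (oxStepB b c) := by
  obtain ⟨res, cnt, prev⟩ := a
  obtain ⟨tot, run⟩ := b
  obtain ⟨h1, h2, h3⟩ := h
  simp only at h1 h2 h3
  by_cases hc : c = 'O'
  · subst hc
    rcases h3 with ⟨hp, hcnt, hpos⟩ | ⟨hp, hcnt, hz⟩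
    · subst hp
      simp only [StInv, oxStepA, oxStepB]
      norm_num
      exact ⟨by have ht := tri_succ run h2; omega, by omega, Or.inl ⟨hcnt, h2⟩⟩
    · subst hp; subst hz; subst hcnt
      simp only [StInv, oxStepA, oxStepB]
      norm_num
      refine ⟨?_, by decide⟩
      rw [if_neg (show ¬('X' = 'O') by decide)]
      norm_num at h1
      omega
  · simp only [StInv, oxStepA, oxStepB, if_neg hc]
    norm_num
    exact h1

theorem inv_foldl (l : List Char) (a : Int × Int × Char) (b : Int × Int)
    (h : StInv a b) : StInv (l.foldl oxStepA a) (l.foldl oxStepB b) := by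
  induction l generalizing a b with
  | nil => exact h
  | cons c t ih => exact ih _ _ (inv_step a b c h)

-- ===== VERDICT (by name: the statement is the Claim_ definition above) =====
theorem ox_spec : Claim_equal_ox := by
  intro s _
  unfold Spec_ox ox ox_alt
  have h := inv_foldl s.toList (0, 1, 'X') (0, 0) ⟨by norm_num, le_refl 0, Or.inr ⟨rfl, rfl, rfl⟩⟩
  obtain ⟨h1, h2, _⟩ := h
  simp only [h1, tri_flush _ h2]
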